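-- pv_equiv track=rewrite | github.com/AileenXie/leetcode | written-examination/0917zhongan&xinyeshujin/01.py | func
-- ===== SOURCE A (Python) =====
-- def func(nums):
--     nums.sort()
--     i = 0
--     zero_count = 0
--     while i < len(nums) and nums[i] == 0:
--         zero_count += 1
--         i += 1
--     if i >= len(nums):
--         return "So Luchy!"
--     for j in range(i+1,len(nums)):
--         gap = nums[j] - nums[j-1] - 1
--         zero_count -= gap  # 填补
--         if zero_count < 0:
--             return "Oh My God!"
--     return "So Luchy!"
-- ===== SOURCE B (Python) =====
-- def func(nums):
--     nums.sort()  # keep A's in-place mutation of the argument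
--     counts = {}
--     for v in nums:
--         counts[v] = counts.get(v, 0) + 1
--     base = min((v for v in counts if v != 0), default=None)
--     if base is None:
--         return "So Luchy!"
--     seen = 0
--     for v in sorted(counts):
--         if v - seen > base:
--             return "Oh My God!"
--         seen += counts[v]
--     return "So Luchy!"
-- ===== Notes on version B (the rewrite author's own statement) =====
-- stated objective: alternative
-- what changed: Replaces A's index walk over the sorted array with a decrementing zero budget by a frequency dictionary over distinct values: B compares each distinct value v against minNonzero using v's first index recovered as the running count of smaller values, instead of accumulating consecutive gaps.
import Mathlib
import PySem

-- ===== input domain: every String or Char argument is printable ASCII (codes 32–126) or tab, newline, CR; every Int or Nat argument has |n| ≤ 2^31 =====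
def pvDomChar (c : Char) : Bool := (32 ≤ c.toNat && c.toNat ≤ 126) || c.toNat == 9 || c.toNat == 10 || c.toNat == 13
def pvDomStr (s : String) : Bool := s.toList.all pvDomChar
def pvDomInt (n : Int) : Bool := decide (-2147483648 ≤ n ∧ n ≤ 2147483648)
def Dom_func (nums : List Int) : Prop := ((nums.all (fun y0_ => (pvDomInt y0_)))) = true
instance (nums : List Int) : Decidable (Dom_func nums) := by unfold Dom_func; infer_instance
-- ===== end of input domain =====

-- B replaces A's index walk over the sorted array (decrementing zero budget with early exit)
-- by a frequency dictionary over distinct values: the first index of each value is recovered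
-- as the running count of smaller values and compared against the minimum nonzero value.
-- Same return value; both Pythons mutate nums in place via nums.sort().

-- ===== PORT A =====
-- while i < len(nums) and nums[i] == 0: zero_count += 1; i += 1   (i and zero_count stay equal)
def funcSkipZeros : List Int → Nat
  | [] => 0
  | x :: xs => if x = 0 then funcSkipZeros xs + 1 else 0

-- for j in range(i+1, len(nums)): gap = nums[j]-nums[j-1]-1; zero_count -= gap; if zero_count < 0: return …
def funcLoop : Int → List Int → Int → String
  | _, [], _ => "So Luchy!"
  | prev, x :: xs, zc =>
    if zc - (x - prev - 1) < 0 then "Oh My God!" else funcLoop x xs (zc - (x - prev - 1))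

def func (nums : List Int) : String :=
  let s := PySem.List.sorted nums (fun v => v) false
  let i := funcSkipZeros s
  match s.drop i with
  | [] => "So Luchy!"                       -- if i >= len(nums): return "So Luchy!"
  | prev :: rest => funcLoop prev rest (i : Int)

-- ===== PORT B =====
-- for v in sorted(counts): if v - seen > base: return "Oh My God!"; seen += counts[v]
def funcAltLoop (base : Int) (counts : PySem.Dict Int Int) : List Int → Int → String
  | [], _ => "So Luchy!"
  | v :: vs, seen =>
    if v - seen > base then "Oh My God!"
    else funcAltLoop base counts vs (seen + counts.getD v 0)

def func_alt (nums : List Int) : String :=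
  let s := PySem.List.sorted nums (fun v => v) false   -- nums.sort()
  -- counts[v] = counts.get(v, 0) + 1 over the (sorted, mutated) nums
  let counts := s.foldl (fun d v => d.insert v (d.getD v 0 + 1)) PySem.Dict.empty
  -- min((v for v in counts if v != 0), default=None)
  match PySem.List.min? (counts.keys.filter (fun v => v != 0)) (fun v => v) with
  | none => "So Luchy!"
  | some base => funcAltLoop base counts (PySem.List.sorted counts.keys (fun v => v) false) 0

-- ===== PRECONDITION & SPEC =====
def Spec_func (nums : List Int) (out : String) : Prop := out = func_alt nums
instance (nums : List Int) (out : String) : Decidable (Spec_func nums out) := by unfold Spec_func; infer_instance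

-- ===== CLAIM (what is proved, stated in full; the proofs are below) =====
def Claim_equal_func : Prop := ∀ (nums : List Int), Dom_func nums → Spec_func nums (func nums)

-- ===== LEMMAS AND PROOFS =====

-- ---- A-side characterisation ----

-- some element at offset k of the tail exceeds c + k
def badFrom : List Int → Int → Bool
  | [], _ => false
  | x :: xs, c => decide (x > c) || badFrom xs (c + 1)

theorem funcLoop_eq_badFrom : ∀ (rest : List Int) (prev zc : Int),
    funcLoop prev rest zc = if badFrom rest (zc + prev + 1) then "Oh My God!" else "So Luchy!" := by
  intro rest
  induction rest with
  | nil => intro prev zc; simp [funcLoop, badFrom]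
  | cons x xs ih =>
    intro prev zc
    simp only [funcLoop]
    rw [ih x (zc - (x - prev - 1)),
      show zc - (x - prev - 1) + x + 1 = (zc + prev + 1) + 1 by ring]
    simp only [badFrom, Bool.or_eq_true, decide_eq_true_eq]
    by_cases h : x > zc + prev + 1
    · simp [h, show zc - (x - prev - 1) < 0 by omega]
    · simp [h, show ¬ (zc - (x - prev - 1) < 0) by omega]

theorem badFrom_iff : ∀ (t : List Int) (c : Int),
    badFrom t c = true ↔ ∃ k, ∃ _ : k < t.length, t[k] > c + (k : Int) := by
  intro t
  induction t with
  | nil => intro c; simp [badFrom]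
  | cons x xs ih =>
    intro c
    simp only [badFrom, Bool.or_eq_true, decide_eq_true_eq, ih]
    constructor
    · rintro (h | ⟨k, hk, hgt⟩)
      · exact ⟨0, by simp, by simpa using h⟩
      · refine ⟨k + 1, by simpa using hk, ?_⟩
        simp only [List.getElem_cons_succ]
        push_cast
        omega
    · rintro ⟨k, hk, hgt⟩
      cases k with
      | zero => exact Or.inl (by simpa using hgt)
      | succ k =>
        refine Or.inr ⟨k, by simpa using hk, ?_⟩
        simp only [List.getElem_cons_succ] at hgt
        push_cast at hgt ⊢
        omega

-- ---- leading-zero prefix (funcSkipZeros) ----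

theorem fsz_le : ∀ (l : List Int), funcSkipZeros l ≤ l.length := by
  intro l
  induction l with
  | nil => simp [funcSkipZeros]
  | cons x xs ih => by_cases h : x = 0 <;> simp [funcSkipZeros, h] <;> omega

theorem fsz_all_zero_of_eq : ∀ (l : List Int), funcSkipZeros l = l.length → ∀ x ∈ l, x = 0 := by
  intro l
  induction l with
  | nil => simp
  | cons a t ih =>
    intro h x hx
    by_cases ha : a = 0
    · simp only [funcSkipZeros, if_pos ha, List.length_cons] at h
      rcases List.mem_cons.mp hx with hx | hx
      · exact hx ▸ ha
      · exact ih (by omega) x hx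
    · simp only [funcSkipZeros, if_neg ha, List.length_cons] at h
      omega

theorem fsz_eq_length_of_all_zero : ∀ (l : List Int), (∀ x ∈ l, x = 0) → funcSkipZeros l = l.length := by
  intro l
  induction l with
  | nil => simp [funcSkipZeros]
  | cons a t ih =>
    intro h
    have ha : a = 0 := h a (by simp)
    simp [funcSkipZeros, ha, ih (fun x hx => h x (by simp [hx]))]

theorem fsz_getElem_zero : ∀ (l : List Int) (k : Nat), k < funcSkipZeros l →
    ∀ (h : k < l.length), l[k] = 0 := by
  intro l
  induction l with
  | nil => simp [funcSkipZeros]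
  | cons a t ih =>
    intro k hk h
    by_cases ha : a = 0
    · cases k with
      | zero => simpa using ha
      | succ k =>
        simp only [funcSkipZeros, if_pos ha] at hk
        simpa using ih k (by omega) (by simpa using h)
    · simp [funcSkipZeros, ha] at hk

theorem fsz_getElem_ne_zero : ∀ (l : List Int) (h : funcSkipZeros l < l.length),
    l[funcSkipZeros l] ≠ 0 := by
  intro l
  induction l with
  | nil => simp [funcSkipZeros]
  | cons a t ih =>
    intro h
    by_cases ha : a = 0
    · simp only [funcSkipZeros, if_pos ha] at h ⊢
      simpa using ih (by simpa using h)
    · simpa [funcSkipZeros, ha] using ha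

-- ---- counting lemmas on ≤-sorted lists ----

theorem monoGet (s : List Int) (hs : s.Pairwise (· ≤ ·)) (p q : Nat) (hpq : p ≤ q)
    (hq : q < s.length) : s[p]'(by omega) ≤ s[q] := by
  rcases Nat.lt_or_ge p q with h | h
  · exact (List.pairwise_iff_getElem.mp hs) p q (by omega) hq h
  · have hpq' : p = q := by omega
    subst hpq'; rfl

theorem countP_le_eq : ∀ (s : List Int) (v : Int),
    s.countP (fun x => decide (x ≤ v)) = s.countP (fun x => decide (x < v)) + s.count v := by
  intro s v
  induction s with
  | nil => simp
  | cons a t ih =>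
    simp only [List.countP_cons, List.count_cons, ih]
    by_cases h1 : a = v
    · simp [h1]; omega
    · by_cases h2 : a < v
      · simp [h2, le_of_lt h2, show (a == v) = false by simpa using h1]; omega
      · simp [h2, show ¬ a ≤ v by omega, show (a == v) = false by simpa using h1]

theorem countP_lt_getElem (s : List Int) (hs : s.Pairwise (· ≤ ·)) :
    ∀ (v : Int), v ∈ s →
      ∃ h : s.countP (fun x => decide (x < v)) < s.length,
        s[s.countP (fun x => decide (x < v))] = v := by
  induction s with
  | nil => simp
  | cons a t ih =>
    intro v hv
    have ha : ∀ x ∈ t, a ≤ x := fun x hx => List.rel_of_pairwise_cons hs hx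
    by_cases hav : a = v
    · have hz : (a :: t).countP (fun x => decide (x < v)) = 0 := by
        apply List.countP_eq_zero.mpr
        intro x hx
        rcases List.mem_cons.mp hx with hx | hx
        · simp [hx, hav]
        · have := ha x hx
          simp only [decide_eq_true_eq]
          omega
      refine ⟨by rw [hz]; simp, ?_⟩
      simp only [hz, List.getElem_cons_zero]
      exact hav
    · have hvt : v ∈ t := by
        rcases List.mem_cons.mp hv with h | h
        · exact absurd h.symm hav
        · exact h
      have halt : a < v := lt_of_le_of_ne (ha v hvt) hav
      have hc : (a :: t).countP (fun x => decide (x < v))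
          = t.countP (fun x => decide (x < v)) + 1 := by
        simp [List.countP_cons, halt]
      obtain ⟨h1, h2⟩ := ih (List.Pairwise.of_cons hs) v hvt
      refine ⟨by rw [hc]; simpa using h1, ?_⟩
      simp only [hc, List.getElem_cons_succ]
      exact h2

theorem countP_split (s : List Int) (j : Nat) (v : Int)
    (h0 : (s.drop j).countP (fun x => decide (x < v)) = 0) :
    s.countP (fun x => decide (x < v)) ≤ j := by
  conv_lhs => rw [← List.take_append_drop j s]
  rw [List.countP_append, h0]
  calc (s.take j).countP (fun x => decide (x < v)) + 0
      ≤ (s.take j).length := by simpa using List.countP_le_length (l := s.take j)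
    _ ≤ j := by simp

theorem countP_lt_le_idx (s : List Int) (hs : s.Pairwise (· ≤ ·)) (j : Nat) (hj : j < s.length) :
    s.countP (fun x => decide (x < s[j])) ≤ j := by
  apply countP_split s j
  apply List.countP_eq_zero.mpr
  intro x hx
  obtain ⟨k, hk, hke⟩ := List.mem_iff_getElem.mp hx
  rw [List.getElem_drop] at hke
  have hjx : s[j] ≤ x := by
    rw [← hke]
    exact monoGet s hs j (j + k) (by omega) (by simp at hk; omega)
  simp only [decide_eq_true_eq]
  omega

-- ---- B-side loop characterisation ----

theorem altLoop_iff (s : List Int) (base : Int) (counts : PySem.Dict Int Int)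
    (hc : ∀ v, counts.getD v 0 = (s.count v : Int)) :
    ∀ (vals : List Int) (seen : Int), vals.Pairwise (· < ·) →
      (∀ x ∈ s, x ∈ vals ∨ ∀ v ∈ vals, x < v) →
      (∀ v t, vals = v :: t → seen = (s.countP (fun x => decide (x < v)) : Int)) →
      (funcAltLoop base counts vals seen = "Oh My God!" ↔
        ∃ v ∈ vals, v - (s.countP (fun x => decide (x < v)) : Int) > base) := by
  intro vals
  induction vals with
  | nil => intro seen _ _ _; simp [funcAltLoop]
  | cons v vs ih =>
    intro seen hpw hmem hseen
    have hseenv : seen = (s.countP (fun x => decide (x < v)) : Int) := hseen v vs rfl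
    have hvlt : ∀ x ∈ vs, v < x := fun x hx => List.rel_of_pairwise_cons hpw hx
    simp only [funcAltLoop]
    by_cases hb : v - seen > base
    · simp only [if_pos hb]
      constructor
      · intro _; exact ⟨v, by simp, by rw [← hseenv]; exact hb⟩
      · intro _; trivial
    · simp only [if_neg hb]
      have hmem' : ∀ x ∈ s, x ∈ vs ∨ ∀ u ∈ vs, x < u := by
        intro x hx
        rcases hmem x hx with h | h
        · rcases List.mem_cons.mp h with h | h
          · exact Or.inr (by subst h; exact hvlt)
          · exact Or.inl h
        · exact Or.inr (fun u hu => h u (by simp [hu]))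
      have hseen' : ∀ w t, vs = w :: t →
          seen + counts.getD v 0 = (s.countP (fun x => decide (x < w)) : Int) := by
        intro w t hvs
        have hvw : v < w := hvlt w (by simp [hvs])
        have hwrest : ∀ x ∈ t, w < x := by
          intro x hx
          have hpw' := List.Pairwise.of_cons hpw
          rw [hvs] at hpw'
          exact List.rel_of_pairwise_cons hpw' hx
        have hcong : s.countP (fun x => decide (x < w)) = s.countP (fun x => decide (x ≤ v)) := by
          apply List.countP_congr
          intro x hx
          have hiff : x < w ↔ x ≤ v := by
            constructor
            · intro hxw
              rcases hmem x hx with hxm | hxm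
              · rcases List.mem_cons.mp hxm with h | h
                · omega
                · rcases List.mem_cons.mp (hvs ▸ h) with h | h
                  · omega
                  · have := hwrest x h; omega
              · have := hxm v (by simp); omega
            · intro hxv; omega
          simpa using hiff
        rw [hc v, hseenv, hcong, countP_le_eq]
        push_cast
        ring
      rw [ih (seen + counts.getD v 0) (List.Pairwise.of_cons hpw) hmem' hseen']
      constructor
      · rintro ⟨u, hu, hgt⟩; exact ⟨u, by simp [hu], hgt⟩
      · rintro ⟨u, hu, hgt⟩
        rcases List.mem_cons.mp hu with hu | hu
        · subst hu; rw [← hseenv] at hgt; exact absurd hgt hb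
        · exact ⟨u, hu, hgt⟩

theorem altLoop_cases (base : Int) (counts : PySem.Dict Int Int) :
    ∀ (vals : List Int) (seen : Int),
      funcAltLoop base counts vals seen = "Oh My God!" ∨
      funcAltLoop base counts vals seen = "So Luchy!" := by
  intro vals
  induction vals with
  | nil => intro seen; simp [funcAltLoop]
  | cons v vs ih =>
    intro seen
    simp only [funcAltLoop]
    by_cases hb : v - seen > base
    · left; rw [if_pos hb]
    · rw [if_neg hb]; exact ih (seen + counts.getD v 0)

-- ---- the bridge between the index form and the value form ----

theorem bridge (s : List Int) (hs : s.Pairwise (· ≤ ·)) (z : Nat) (hzl : z < s.length)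
    (hz0 : ∀ k, k < z → ∀ _ : k < s.length, s[k] = 0) (hznz : s[z] ≠ 0) :
    ((∃ j, ∃ _ : j < s.length, z < j ∧ s[j] - (j : Int) > s[z]) ↔
      ∃ v ∈ s, v - (s.countP (fun x => decide (x < v)) : Int) > s[z]) := by
  constructor
  · rintro ⟨j, hj, hzj, hgt⟩
    refine ⟨s[j], List.getElem_mem hj, ?_⟩
    have hle : s.countP (fun x => decide (x < s[j])) ≤ j := countP_lt_le_idx s hs j hj
    have hle' : ((s.countP (fun x => decide (x < s[j])) : Nat) : Int) ≤ (j : Int) := by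
      exact_mod_cast hle
    omega
  · rintro ⟨v, hv, hgt⟩
    obtain ⟨hclen, hcget⟩ := countP_lt_getElem s hs v hv
    refine ⟨s.countP (fun x => decide (x < v)), hclen, ?_, by rw [hcget]; omega⟩
    by_contra hcz
    push_neg at hcz
    rcases Nat.lt_or_ge (s.countP (fun x => decide (x < v))) z with hlt | hge
    · have hv0 : v = 0 := by rw [← hcget]; exact hz0 _ hlt hclen
      have hzpos : 0 < z := by omega
      have hs0 : s[0]'(by omega) = 0 := hz0 0 (by omega) (by omega)
      have hc0 : s.countP (fun x => decide (x < v)) = 0 := by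
        apply List.countP_eq_zero.mpr
        intro x hx
        obtain ⟨k, hk, hke⟩ := List.mem_iff_getElem.mp hx
        have h0x : s[0]'(by omega) ≤ x := by rw [← hke]; exact monoGet s hs 0 k (by omega) hk
        simp only [decide_eq_true_eq]
        rw [hs0] at h0x
        omega
      have hsz : (0:Int) ≤ s[z] := by
        have := monoGet s hs 0 z (by omega) hzl
        rw [hs0] at this
        exact this
      rw [hc0] at hgt
      rw [hv0] at hgt
      simp at hgt
      omega
    · have hcz' : s.countP (fun x => decide (x < v)) = z := by omega
      have hveq : v = s[z] := by rw [← hcget]; congr 1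
      rw [hcz'] at hgt
      rw [hveq] at hgt
      omega

theorem func_spec' : ∀ (nums : List Int), func nums = func_alt nums := by
  intro nums
  have hB : func_alt nums =
      (match PySem.List.min?
          ((PySem.Dict.counter (PySem.List.sorted nums (fun v => v) false)).keys.filter
            (fun v => v != 0)) (fun v => v) with
        | none => "So Luchy!"
        | some base =>
            funcAltLoop base (PySem.Dict.counter (PySem.List.sorted nums (fun v => v) false))
              (PySem.List.sorted
                (PySem.Dict.counter (PySem.List.sorted nums (fun v => v) false)).keys
                (fun v => v) false) 0) := rfl
  rw [hB]
  set s := PySem.List.sorted nums (fun v => v) false with hsdef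
  have hA : func nums = (match s.drop (funcSkipZeros s) with
    | [] => "So Luchy!"
    | prev :: rest => funcLoop prev rest ((funcSkipZeros s : Nat) : Int)) := rfl
  rw [hA]
  have hpw : s.Pairwise (· ≤ ·) := PySem.List.sorted_pairwise nums (fun v => v)
  set z := funcSkipZeros s with hzdef
  rw [PySem.Dict.keys_counter]
  by_cases hall : ∀ x ∈ s, x = 0
  · -- all elements are zero (or the list is empty): both sides return "So Luchy!"
    have hz : z = s.length := fsz_eq_length_of_all_zero s hall
    have hdrop : s.drop z = [] := by rw [hz]; simp
    have hfilter : (PySem.Set.ofList s).filter (fun v => v != 0) = [] := by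
      apply List.filter_eq_nil_iff.mpr
      intro v hv
      have : v = 0 := hall v ((PySem.Set.mem_ofList s v).mp hv)
      simp [this]
    rw [hdrop, hfilter]
    rfl
  · -- there is a nonzero element
    push_neg at hall
    obtain ⟨x0, hx0s, hx0⟩ := hall
    have hzl : z < s.length := by
      rcases Nat.lt_or_ge z s.length with h | h
      · exact h
      · have hz : z = s.length := le_antisymm (fsz_le s) h
        exact absurd (fsz_all_zero_of_eq s hz x0 hx0s) hx0
    have hznz : s[z] ≠ 0 := fsz_getElem_ne_zero s hzl
    have hz0 : ∀ k, k < z → ∀ _ : k < s.length, s[k] = 0 := fun k hk h => fsz_getElem_zero s k hk h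
    have hdrop : s.drop z = s[z] :: s.drop (z + 1) := List.drop_eq_getElem_cons hzl
    rw [hdrop]
    show funcLoop (s[z]'hzl) (s.drop (z + 1)) ((z : Nat) : Int) = _
    -- the A side as an explicit test
    rw [funcLoop_eq_badFrom]
    -- min? is some s[z]
    have hszfil : s[z] ∈ (PySem.Set.ofList s).filter (fun v => v != 0) := by
      apply List.mem_filter.mpr
      exact ⟨(PySem.Set.mem_ofList s _).mpr (List.getElem_mem hzl), by simpa using hznz⟩
    rcases hmin : PySem.List.min? ((PySem.Set.ofList s).filter (fun v => v != 0)) (fun v => v)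
      with _ | base
    · exact absurd ((PySem.List.min?_eq_none_iff _ _).mp hmin)
        (List.ne_nil_of_mem hszfil)
    have hbs : base ∈ s ∧ base ≠ 0 := by
      have := List.mem_filter.mp (PySem.List.min?_mem hmin)
      exact ⟨(PySem.Set.mem_ofList s base).mp this.1, by simpa using this.2⟩
    have hbase : base = s[z] := by
      apply le_antisymm (PySem.List.min?_isMin hmin s[z] hszfil)
      obtain ⟨k, hk, hke⟩ := List.mem_iff_getElem.mp hbs.1
      have hkz : z ≤ k := by
        by_contra hlt
        exact hbs.2 (hke ▸ hz0 k (by omega) hk)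
      calc s[z] ≤ s[k] := monoGet s hpw z k hkz hk
        _ = base := hke
    -- the B-side loop as an explicit test
    have hcnt : ∀ v, (PySem.Dict.counter s).getD v 0 = (s.count v : Int) :=
      fun v => PySem.Dict.getD_counter s v
    have hvalspw : (PySem.List.sorted (PySem.Set.ofList s) (fun v => v) false).Pairwise (· < ·) :=
      PySem.List.sorted_ofList_pairwise_lt s
    have hvalsmem : ∀ x ∈ s, x ∈ PySem.List.sorted (PySem.Set.ofList s) (fun v => v) false ∨
        ∀ u ∈ PySem.List.sorted (PySem.Set.ofList s) (fun v => v) false, x < u := by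
      intro x hx
      exact Or.inl ((PySem.List.mem_sorted _ _ _ x).mpr ((PySem.Set.mem_ofList s x).mpr hx))
    have hvalshead : ∀ v t, PySem.List.sorted (PySem.Set.ofList s) (fun v => v) false = v :: t →
        (0 : Int) = (s.countP (fun x => decide (x < v)) : Int) := by
      intro v t hvt
      have hmin' : ∀ y ∈ PySem.Set.ofList s, v ≤ y := PySem.List.key_head_sorted_le _ _ hvt
      have : s.countP (fun x => decide (x < v)) = 0 := by
        apply List.countP_eq_zero.mpr
        intro x hx
        have := hmin' x ((PySem.Set.mem_ofList s x).mpr hx)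
        simp only [decide_eq_true_eq]
        omega
      simp [this]
    have hloop := altLoop_iff s base (PySem.Dict.counter s) hcnt
      (PySem.List.sorted (PySem.Set.ofList s) (fun v => v) false) 0
      hvalspw hvalsmem hvalshead
    -- A's test is equivalent to B's test
    have hAiff : badFrom (s.drop (z + 1)) ((z : Int) + s[z] + 1) = true ↔
        ∃ j, ∃ _ : j < s.length, z < j ∧ s[j] - (j : Int) > s[z] := by
      rw [badFrom_iff]
      constructor
      · rintro ⟨k, hk, hgt⟩
        have hk' : z + 1 + k < s.length := by simp [List.length_drop] at hk; omega
        refine ⟨z + 1 + k, hk', by omega, ?_⟩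
        rw [List.getElem_drop] at hgt
        push_cast at hgt ⊢
        omega
      · rintro ⟨j, hj, hzj, hgt⟩
        refine ⟨j - (z + 1), by simp [List.length_drop]; omega, ?_⟩
        rw [List.getElem_drop]
        have hidx : s[z + 1 + (j - (z + 1))]'(by omega) = s[j] := by congr 1; omega
        rw [hidx]
        omega
    have hBiff : (funcAltLoop base (PySem.Dict.counter s)
        (PySem.List.sorted (PySem.Set.ofList s) (fun v => v) false) 0 = "Oh My God!") ↔
        ∃ v ∈ s, v - (s.countP (fun x => decide (x < v)) : Int) > s[z] := by
      rw [hloop, hbase]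
      constructor
      · rintro ⟨v, hv, hgt⟩
        exact ⟨v, (PySem.Set.mem_ofList s v).mp ((PySem.List.mem_sorted _ _ _ v).mp hv), hgt⟩
      · rintro ⟨v, hv, hgt⟩
        exact ⟨v, (PySem.List.mem_sorted _ _ _ v).mpr ((PySem.Set.mem_ofList s v).mpr hv), hgt⟩
    have hbridge := bridge s hpw z hzl hz0 hznz
    by_cases hbad : badFrom (s.drop (z + 1)) ((z : Int) + s[z] + 1) = true
    · rw [if_pos hbad]
      exact (hBiff.mpr (hbridge.mp (hAiff.mp hbad))).symm
    · rw [if_neg hbad]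
      rcases altLoop_cases base (PySem.Dict.counter s)
        (PySem.List.sorted (PySem.Set.ofList s) (fun v => v) false) 0 with hres | hres
      · exact absurd (hAiff.mpr (hbridge.mpr (hBiff.mp hres))) hbad
      · exact hres.symm

-- ===== VERDICT (by name: the statement is the Claim_ definition above) =====
theorem func_spec : Claim_equal_func := by
  intro nums _
  unfold Spec_func
  exact func_spec' nums
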